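-- pv_equiv track=rewrite | github.com/potomatoo/TIL | Kakao/kakao_최고의 집합.py | solution
-- ===== SOURCE A (Python) =====
-- def solution(n, s):
--     answer = []
--     k = s // n
--     remain = s % n
--     if k == 0:
--         return [-1]
--     for i in range(n):
--         answer.append(k)
--
--     cnt = 0
--     while remain:
--         answer[cnt] = k+1
--         cnt += 1
--         remain -= 1
--     answer.sort()
--     return answer
-- ===== SOURCE B (Python) =====
-- def solution(n, s):
--     if s // n == 0:
--         return [-1]
--     answer = []
--     while n > 0:
--         answer.append(s // n)
--         s -= s // n
--         n -= 1
--     return answer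
-- ===== Notes on version B (the rewrite author's own statement) =====
-- stated objective: alternative
-- what changed: B builds the answer greedily: each position in turn gets floor(remaining sum / remaining slots), with no divmod split into blocks, no index-rewriting pass and no sort; the greedy quotients are provably nondecreasing, so the result is already sorted.
import Mathlib
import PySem

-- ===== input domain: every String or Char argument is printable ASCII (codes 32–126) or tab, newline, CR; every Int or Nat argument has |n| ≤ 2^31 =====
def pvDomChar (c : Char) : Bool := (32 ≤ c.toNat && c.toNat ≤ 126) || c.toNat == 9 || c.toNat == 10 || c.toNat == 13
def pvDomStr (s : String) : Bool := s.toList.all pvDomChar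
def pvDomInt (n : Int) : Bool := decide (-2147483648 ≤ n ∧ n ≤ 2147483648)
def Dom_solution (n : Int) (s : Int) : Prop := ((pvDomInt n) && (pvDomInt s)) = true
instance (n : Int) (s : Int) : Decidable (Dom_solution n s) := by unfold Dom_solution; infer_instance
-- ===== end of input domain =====

-- B replaces A's divmod-split + fill + index-rewriting pass + sort by a greedy loop:
-- each position gets floor(remaining sum / remaining slots); alternative decomposition, no sort.

-- ===== PORT A =====
-- the 'while remain: answer[cnt] = k+1; cnt += 1; remain -= 1' loop; fuel = remain.toNat
-- (exact whenever remain ≥ 0, which holds on every input Pre_ admits)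
def solutionWhile (fuel : Nat) (answer : List Int) (cnt : Nat) (k : Int) : List Int :=
  match fuel with
  | 0 => answer
  | f + 1 => solutionWhile f (answer.set cnt (k + 1)) (cnt + 1) k

def solution (n : Int) (s : Int) : List Int :=
  let k := PySem.Int.floordiv s n
  let remain := PySem.Int.mod s n
  if k = 0 then [-1]
  else
    let answer := (PySem.List.pyRange 0 n 1).foldl (fun acc _ => acc ++ [k]) []
    let answer := solutionWhile remain.toNat answer 0 k
    PySem.List.sorted answer (fun x => x) false

-- ===== PORT B =====
-- the 'while n > 0: answer.append(s // n); s -= s // n; n -= 1' loop;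
-- fuel = n.toNat is exact since n decreases by exactly 1 each iteration
def solGreedy : Nat → Int → List Int
  | 0, _ => []
  | m + 1, s =>
      PySem.Int.floordiv s ((m : Int) + 1)
        :: solGreedy m (s - PySem.Int.floordiv s ((m : Int) + 1))

def solution_alt (n : Int) (s : Int) : List Int :=
  if PySem.Int.floordiv s n = 0 then [-1]
  else solGreedy n.toNat s

-- ===== PRECONDITION & SPEC =====
-- A raises ZeroDivisionError for n = 0 and IndexError for n < 0 unless n divides s
-- (then remain = 0 and the while loop never runs) or s // n = 0 (then it returns [-1]
-- before the loop); Pre_ admits exactly the inputs on which A returns normally.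
def Pre_solution (n : Int) (s : Int) : Prop :=
  0 < n ∨ (n < 0 ∧ (PySem.Int.mod s n = 0 ∨ PySem.Int.floordiv s n = 0))
instance (n : Int) (s : Int) : Decidable (Pre_solution n s) := by
  unfold Pre_solution; infer_instance

def pvWitness_solution : Int × Int := (3, 11)

def Spec_solution (n : Int) (s : Int) (out : List Int) : Prop := out = solution_alt n s
instance (n : Int) (s : Int) (out : List Int) : Decidable (Spec_solution n s out) := by unfold Spec_solution; infer_instance

-- ===== CLAIM (what is proved, stated in full; the proofs are below) =====
def Claim_equal_solution : Prop := ∀ (n : Int) (s : Int), Dom_solution n s → Pre_solution n s → Spec_solution n s (solution n s)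

-- ===== LEMMAS AND PROOFS =====

-- the append-only for loop builds k repeated (length of range) times
theorem foldl_append_const (l : List Int) (acc : List Int) (k : Int) :
    l.foldl (fun acc _ => acc ++ [k]) acc = acc ++ List.replicate l.length k := by
  induction l generalizing acc with
  | nil => simp
  | cons x t ih =>
    rw [List.foldl_cons, ih, List.append_assoc]
    congr 1

theorem set_append_cons (pre : List Int) (x v : Int) (t : List Int) :
    (pre ++ x :: t).set pre.length v = pre ++ v :: t := by
  induction pre with
  | nil => simp
  | cons y p ih => simp [ih]

-- the while loop overwrites the first `f` remaining slots with k+1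
theorem solutionWhile_spec (f : Nat) (pre suf : List Int) (k : Int)
    (h : f ≤ suf.length) :
    solutionWhile f (pre ++ suf) pre.length k
      = pre ++ List.replicate f (k + 1) ++ suf.drop f := by
  induction f generalizing pre suf with
  | zero => simp [solutionWhile]
  | succ f ih =>
    cases suf with
    | nil => simp at h
    | cons x t =>
      have hset := set_append_cons pre x (k + 1) t
      have hlen : (pre ++ [k + 1]).length = pre.length + 1 := by simp
      have := ih (pre ++ [k + 1]) t (by simpa using Nat.le_of_succ_le_succ h)
      simp only [solutionWhile, hset]
      rw [show pre.length + 1 = (pre ++ [k + 1]).length from hlen.symm] at *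
      rw [show pre ++ (k + 1) :: t = (pre ++ [k + 1]) ++ t by simp] at *
      rw [this]
      simp [List.replicate_succ]

theorem replicate_swap_sorted (a b : Nat) (k : Int) :
    PySem.List.sorted (List.replicate a (k + 1) ++ List.replicate b k)
      (fun x => x) false
      = List.replicate b k ++ List.replicate a (k + 1) := by
  apply PySem.List.sorted_id_eq_of_perm_of_pairwise
  · exact List.perm_append_comm
  · refine List.pairwise_append.mpr ⟨?_, ?_, ?_⟩
    · exact List.pairwise_replicate.mpr (Or.inr le_rfl)
    · exact List.pairwise_replicate.mpr (Or.inr le_rfl)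
    · intro x hx y hy
      rw [List.eq_of_mem_replicate hx, List.eq_of_mem_replicate hy]; omega

-- A's closed form on the main case 0 < n, k ≠ 0
theorem solution_closed (n s : Int) (hn : 0 < n)
    (hk0 : PySem.Int.floordiv s n ≠ 0) :
    solution n s
      = List.replicate (n - PySem.Int.mod s n).toNat (PySem.Int.floordiv s n)
        ++ List.replicate (PySem.Int.mod s n).toNat (PySem.Int.floordiv s n + 1) := by
  unfold solution
  set k := PySem.Int.floordiv s n with hk
  set r := PySem.Int.mod s n with hrdef
  simp only [hk0, if_false]
  have hr_nonneg : 0 ≤ r := PySem.Int.mod_nonneg s hn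
  have hr_lt : r < n := PySem.Int.mod_lt s hn
  have hlen : (PySem.List.pyRange 0 n 1).length = n.toNat := by
    simp [PySem.List.length_pyRange_one]
  have hfold := foldl_append_const (PySem.List.pyRange 0 n 1) [] k
  rw [hlen] at hfold
  have hle : r.toNat ≤ (List.replicate n.toNat k).length := by simp; omega
  have hwhile := solutionWhile_spec r.toNat [] (List.replicate n.toNat k) k
    (by simpa using hle)
  simp only [List.nil_append, List.length_nil] at hwhile hfold
  rw [hfold, hwhile, List.drop_replicate, replicate_swap_sorted]
  congr 1
  congr 1
  omega

-- quotient/remainder of b*q + r for 0 ≤ r < b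
theorem fdiv_mod_add (b q r : Int) (hb : 0 < b) (h0 : 0 ≤ r) (h1 : r < b) :
    PySem.Int.floordiv (b * q + r) b = q ∧ PySem.Int.mod (b * q + r) b = r := by
  have hd : PySem.Int.floordiv (b * q + r) b = q := by
    rw [PySem.Int.floordiv_eq_iff_of_pos hb]
    constructor <;> nlinarith
  refine ⟨hd, ?_⟩
  have h := PySem.Int.floordiv_mul_add_mod (b * q + r) b
  rw [hd] at h
  linarith

-- the greedy loop produces exactly the sorted block form
theorem solGreedy_closed (m : Nat) (s : Int) (hm : 0 < m) :
    solGreedy m s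
      = List.replicate (m - (PySem.Int.mod s m).toNat) (PySem.Int.floordiv s m)
        ++ List.replicate (PySem.Int.mod s m).toNat (PySem.Int.floordiv s m + 1) := by
  induction m generalizing s with
  | zero => omega
  | succ m' ih =>
    have hbpos : (0 : Int) < (m' : Int) + 1 := by positivity
    have hcast : ((m' + 1 : Nat) : Int) = (m' : Int) + 1 := by push_cast; ring
    simp only [solGreedy]
    rw [hcast]
    set k := PySem.Int.floordiv s ((m' : Int) + 1) with hk
    set r := PySem.Int.mod s ((m' : Int) + 1) with hr
    have hs : k * ((m' : Int) + 1) + r = s :=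
      PySem.Int.floordiv_mul_add_mod s ((m' : Int) + 1)
    have hr0 : 0 ≤ r := PySem.Int.mod_nonneg s hbpos
    have hr1 : r < (m' : Int) + 1 := PySem.Int.mod_lt s hbpos
    rcases Nat.eq_zero_or_pos m' with hz | hm'
    · -- m = 1: single slot gets all of s, remainder 0
      subst hz
      have h1 := fdiv_mod_add 1 s 0 one_pos le_rfl one_pos
      simp only [one_mul, add_zero] at h1
      have hk1 : k = s := by rw [hk]; norm_num
      have hrx : r = 0 := by rw [hr]; norm_num
      simp [solGreedy, hk1, hrx]
    · -- m' ≥ 1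
      have hmi : (0 : Int) < (m' : Int) := by exact_mod_cast hm'
      have hrec : s - k = (m' : Int) * k + r := by linarith
      have hih := ih (s - k) hm'
      by_cases htop : r = (m' : Int)
      · -- remainder fills all remaining slots: next quotient is k + 1, remainder 0
        have h2 := fdiv_mod_add (m' : Int) (k + 1) 0 hmi le_rfl hmi
        have harg : s - k = (m' : Int) * (k + 1) + 0 := by rw [hrec, htop]; ring
        rw [harg] at hih
        rw [h2.1, h2.2] at hih
        rw [harg, hih]
        have hrt : r.toNat = m' := by omega
        simp [hrt]
      · -- r < m': next quotient is still k, remainder unchanged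
        have hrlt : r < (m' : Int) := lt_of_le_of_ne (by omega) htop
        have h2 := fdiv_mod_add (m' : Int) k r hmi hr0 hrlt
        rw [hrec, h2.1, h2.2] at hih
        rw [hrec, hih]
        have hcount : m' + 1 - r.toNat = (m' - r.toNat) + 1 := by omega
        rw [hcount, List.replicate_succ, List.cons_append]

-- ===== VERDICT (by name: the statement is the Claim_ definition above) =====
theorem solution_spec : Claim_equal_solution := by
  intro n s _ hpre
  unfold Spec_solution solution_alt
  rcases hpre with hn | ⟨hn, hr0 | hk0⟩
  · -- 0 < n
    by_cases hk0 : PySem.Int.floordiv s n = 0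
    · simp [hk0, solution]
    · simp only [hk0, if_false]
      have hmn : (0:Nat) < n.toNat := by omega
      have hcast : ((n.toNat : Nat) : Int) = n := Int.toNat_of_nonneg (le_of_lt hn)
      rw [solution_closed n s hn hk0, solGreedy_closed n.toNat s hmn, hcast]
      have hr0' : 0 ≤ PySem.Int.mod s n := PySem.Int.mod_nonneg s hn
      have hr1' : PySem.Int.mod s n < n := PySem.Int.mod_lt s hn
      congr 2
      omega
  · -- n < 0 and n ∣ s: remain = 0, A returns [] (or [-1]); B's loop never runs
    by_cases hk0 : PySem.Int.floordiv s n = 0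
    · simp [hk0, solution]
    · simp only [hk0, if_false]
      have hnt : n.toNat = 0 := by omega
      have hrange : PySem.List.pyRange 0 n 1 = [] := by
        have h0 : (PySem.List.pyRange 0 n 1).length = 0 := by
          simp [PySem.List.length_pyRange_one]; omega
        exact List.eq_nil_of_length_eq_zero h0
      simp [solution, hk0, hrange, hr0, solutionWhile, PySem.List.sorted, hnt, solGreedy]
  · -- n < 0 and s // n = 0: A returns [-1] before the loop; so does B
    simp [solution, hk0]
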